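-- pv_equiv track=rewrite | github.com/Aarav2709/DecryptionToolkeet | Python/DecryptionToolkeet/decoders/rot5_decoder.py | _rot5
-- ===== SOURCE A (Python) =====
-- def _rot5(text: str) -> str:
--     result = []
--     for char in text:
--         if char.isdigit():
--             rotated = (int(char) + 5) % 10
--             result.append(str(rotated))
--         else:
--             result.append(char)
--     return ''.join(result)
-- ===== SOURCE B (Python) =====
-- _ROT5_TABLE = str.maketrans('0123456789', '5678901234')
--
-- def _rot5(text: str) -> str:
--     return text.translate(_ROT5_TABLE)
-- ===== Notes on version B (the rewrite author's own statement) =====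
-- stated objective: faster
-- what changed: Replaced the per-character isdigit branch with int()/str() round-trip and list-append/join by a precomputed ten-entry digit translation table applied via str.translate in one C-level library pass.
import Mathlib
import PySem

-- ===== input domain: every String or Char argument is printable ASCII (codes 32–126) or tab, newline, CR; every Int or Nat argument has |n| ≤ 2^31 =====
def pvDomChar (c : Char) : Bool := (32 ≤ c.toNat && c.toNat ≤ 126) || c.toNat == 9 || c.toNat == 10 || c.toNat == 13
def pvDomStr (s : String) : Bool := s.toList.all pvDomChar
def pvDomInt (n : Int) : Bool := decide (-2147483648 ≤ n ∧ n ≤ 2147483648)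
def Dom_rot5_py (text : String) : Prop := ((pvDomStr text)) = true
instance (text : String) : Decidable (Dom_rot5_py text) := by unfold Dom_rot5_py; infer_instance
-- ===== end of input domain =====

-- B replaces A's per-character branch-and-append loop with a precomputed digit→digit
-- translation table applied in one map over the string (idiomatic, like str.translate).

-- ===== PORT A =====
-- literal transliteration of A: build a list of strings char by char, then ''.join
def rot5_py (text : String) : String :=
  let result := text.toList.foldl
    (fun (result : List String) char =>
      if PySem.Chars.isdigit char then
        -- rotated = (int(char) + 5) % 10 ; within this branch int(char) succeeds
        let rotated := PySem.Int.mod ((PySem.Int.ofChars? [char]).getD 0 + 5) 10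
        result ++ [PySem.Int.toStr rotated]
      else
        result ++ [String.ofList [char]]) []
  PySem.Str.join "" result

-- ===== PORT B =====
-- the fixed translation table: each digit mapped to its ROT5 image
def rot5Table : List (Char × Char) :=
  List.zip "0123456789".toList "5678901234".toList

def rot5_py_alt (text : String) : String :=
  String.ofList (text.toList.map (fun c => (rot5Table.lookup c).getD c))

-- ===== PRECONDITION & SPEC =====
def Spec_rot5_py (text : String) (out : String) : Prop := out = rot5_py_alt text
instance (text : String) (out : String) : Decidable (Spec_rot5_py text out) := by unfold Spec_rot5_py; infer_instance

-- ===== CLAIM (what is proved, stated in full; the proofs are below) =====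
def Claim_equal_rot5_py : Prop := ∀ (text : String), Dom_rot5_py text → Spec_rot5_py text (rot5_py text)

-- ===== LEMMAS AND PROOFS =====

-- A's per-character contribution, as a named function
def rot5A (char : Char) : String :=
  if PySem.Chars.isdigit char then
    PySem.Int.toStr (PySem.Int.mod ((PySem.Int.ofChars? [char]).getD 0 + 5) 10)
  else
    String.ofList [char]

-- B's per-character function
def rot5B (c : Char) : Char := (rot5Table.lookup c).getD c

theorem digit_cases (c : Char) (h : PySem.Chars.isdigit c = true) :
    c = '0' ∨ c = '1' ∨ c = '2' ∨ c = '3' ∨ c = '4' ∨ c = '5' ∨ c = '6' ∨ c = '7' ∨ c = '8' ∨ c = '9' := by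
  simp only [PySem.Chars.isdigit, Char.le_def, UInt32.le_iff_toNat_le] at h
  simp only [Char.ext_iff, UInt32.ext_iff]
  norm_num at h ⊢
  have e0 : '0'.toNat = 48 := rfl
  have e1 : '1'.toNat = 49 := rfl
  have e2 : '2'.toNat = 50 := rfl
  have e3 : '3'.toNat = 51 := rfl
  have e4 : '4'.toNat = 52 := rfl
  have e5 : '5'.toNat = 53 := rfl
  have e6 : '6'.toNat = 54 := rfl
  have e7 : '7'.toNat = 55 := rfl
  have e8 : '8'.toNat = 56 := rfl
  have e9 : '9'.toNat = 57 := rfl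
  omega

-- each character contributes the same single character under A and B
theorem char_eq (c : Char) : rot5A c = String.ofList [rot5B c] := by
  by_cases h : PySem.Chars.isdigit c = true
  · rcases digit_cases c h with h'|h'|h'|h'|h'|h'|h'|h'|h'|h' <;> subst h' <;> decide
  · have hB : rot5B c = c := by
      have : rot5Table.lookup c = none := by
        apply List.lookup_eq_none_iff.mpr
        intro p hp
        -- the table's keys are the ten digits; c is not a digit
        have htab : rot5Table = [('0','5'),('1','6'),('2','7'),('3','8'),('4','9'),
            ('5','0'),('6','1'),('7','2'),('8','3'),('9','4')] := by decide
        rw [htab] at hp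
        simp only [List.mem_cons, List.not_mem_nil, or_false] at hp
        rcases hp with hp|hp|hp|hp|hp|hp|hp|hp|hp|hp <;> subst hp <;>
          (simp only [bne_iff_ne, ne_eq]; rintro rfl; exact h (by decide))
      simp [rot5B, this]
    simp [rot5A, h, hB]

-- A's fold accumulates the per-character strings
theorem foldl_eq (l : List Char) (acc : List String) :
    l.foldl (fun (result : List String) char =>
      if PySem.Chars.isdigit char then
        result ++ [PySem.Int.toStr (PySem.Int.mod ((PySem.Int.ofChars? [char]).getD 0 + 5) 10)]
      else result ++ [String.ofList [char]]) acc
    = acc ++ l.map rot5A := by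
  induction l generalizing acc with
  | nil => simp
  | cons c l ih =>
    simp only [List.foldl_cons, List.map_cons, ih]
    by_cases h : PySem.Chars.isdigit c = true <;> simp [rot5A, h]

-- joining singleton strings with "" yields the string of their characters
theorem join_singletons (l : List Char) :
    PySem.Str.join "" (l.map (fun c => String.ofList [c])) = String.ofList l := by
  apply String.toList_injective
  rw [PySem.Str.toList_join]
  have h := PySem.Chars.join_nil_singletons l
  simp only [List.map_map]
  have hmap : (String.toList ∘ fun c => String.ofList [c]) = (fun c => [c]) := by
    funext c; simp
  rw [hmap]
  simp only [String.toList_ofList]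
  exact h


-- ===== VERDICT (by name: the statement is the Claim_ definition above) =====
theorem rot5_py_spec : Claim_equal_rot5_py := by
  intro text _
  unfold Spec_rot5_py rot5_py rot5_py_alt
  rw [foldl_eq]
  have : (text.toList.map rot5A) = text.toList.map (fun c => String.ofList [rot5B c]) := by
    simp [char_eq]
  simp only [List.nil_append, this]
  have := join_singletons (text.toList.map rot5B)
  simpa [List.map_map, Function.comp, rot5B] using this
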